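-- pv_equiv track=rewrite | github.com/TRACEMANTIS/SlopFactory | MikroTik/scripts/attack_www_json.py | detect_crash
-- ===== SOURCE A (Python) =====
-- def detect_crash(pre_uptime, post_health):
--     """Compare uptime strings to detect reboot. Returns True if crash detected."""
--     if not post_health.get("alive"):
--         return True
--     post_uptime = post_health.get("uptime", "")
--     if not pre_uptime or not post_uptime:
--         return False
--     # RouterOS uptime format: "1d2h3m4s" — if post < pre, router rebooted
--     def parse_uptime(u):
--         """Parse RouterOS uptime string to total seconds."""
--         total = 0
--         current = ""
--         for ch in str(u):
--             if ch.isdigit():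
--                 current += ch
--             elif ch == 'w':
--                 total += int(current or 0) * 604800
--                 current = ""
--             elif ch == 'd':
--                 total += int(current or 0) * 86400
--                 current = ""
--             elif ch == 'h':
--                 total += int(current or 0) * 3600
--                 current = ""
--             elif ch == 'm':
--                 total += int(current or 0) * 60
--                 current = ""
--             elif ch == 's':
--                 total += int(current or 0)
--                 current = ""
--         return total
--
--     pre_sec = parse_uptime(pre_uptime)
--     post_sec = parse_uptime(post_uptime)
--     # If post uptime is significantly less than pre, router rebooted
--     return post_sec < pre_sec - 10
-- ===== SOURCE B (Python) =====
-- def detect_crash(pre_uptime, post_health):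
--     """Compare uptime strings to detect reboot. Returns True if crash detected."""
--     if not post_health.get("alive"):
--         return True
--     post_uptime = post_health.get("uptime", "")
--     if not pre_uptime or not post_uptime:
--         return False
--
--     def unit_secs(c):
--         if c == 'w': return 604800
--         if c == 'd': return 86400
--         if c == 'h': return 3600
--         if c == 'm': return 60
--         if c == 's': return 1
--         return None
--
--     def parse_uptime(u):
--         """Right-to-left pass: each digit contributes digit * place * unit-multiplier."""
--         total, mult, place = 0, 0, 1
--         for c in reversed(str(u)):
--             m = unit_secs(c)
--             if m is not None:
--                 mult, place = m, 1
--             elif c.isdigit():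
--                 total += int(c) * place * mult
--                 place *= 10
--         return total
--
--     return parse_uptime(post_uptime) < parse_uptime(pre_uptime) - 10
-- ===== Notes on version B (the rewrite author's own statement) =====
-- stated objective: alternative
-- what changed: parse_uptime's left-to-right string-accumulator loop (building a digit substring, calling int() at each unit letter) is replaced by a single reversed pass using positional arithmetic: each digit contributes digit*place*multiplier, where the current unit multiplier and decimal place are carried right-to-left; no substring or int() on strings is needed.
import Mathlib
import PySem

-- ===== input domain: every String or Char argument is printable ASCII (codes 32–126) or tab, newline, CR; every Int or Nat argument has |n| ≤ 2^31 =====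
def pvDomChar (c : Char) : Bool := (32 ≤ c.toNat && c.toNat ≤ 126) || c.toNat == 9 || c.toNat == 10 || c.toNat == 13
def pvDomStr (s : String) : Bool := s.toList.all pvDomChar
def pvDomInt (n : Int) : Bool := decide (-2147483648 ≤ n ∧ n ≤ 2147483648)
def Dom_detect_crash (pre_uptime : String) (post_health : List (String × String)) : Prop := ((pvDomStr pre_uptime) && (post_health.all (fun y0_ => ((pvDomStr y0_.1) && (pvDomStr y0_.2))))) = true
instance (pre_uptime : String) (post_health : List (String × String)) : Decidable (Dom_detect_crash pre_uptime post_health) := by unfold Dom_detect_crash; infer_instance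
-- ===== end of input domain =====

-- B replaces A's left-to-right digit-substring accumulator by one reversed pass with
-- positional arithmetic (objective: alternative; same O(n) cost).

-- shared helper: dict.get = first match in the insertion-order association list
def pvDictGet (d : List (String × String)) (k : String) : Option String :=
  (d.find? (fun p => p.1 == k)).map (·.2)

-- ===== PORT A =====
-- int(current or 0) where current only ever holds decimal digit characters:
-- ported by hand as the decimal value (exact for '0'-'9' strings; '' gives 0 like int(0)).
def pvIntDigits (cs : List Char) : Int :=
  cs.foldl (fun a c => 10 * a + ((c.toNat : Int) - 48)) 0

-- one step of A's parse_uptime loop; state = (total, current)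
def pvStepA (st : Int × List Char) (ch : Char) : Int × List Char :=
  if PySem.Chars.isdigit ch then (st.1, st.2 ++ [ch])
  else if ch = 'w' then (st.1 + pvIntDigits st.2 * 604800, [])
  else if ch = 'd' then (st.1 + pvIntDigits st.2 * 86400, [])
  else if ch = 'h' then (st.1 + pvIntDigits st.2 * 3600, [])
  else if ch = 'm' then (st.1 + pvIntDigits st.2 * 60, [])
  else if ch = 's' then (st.1 + pvIntDigits st.2, [])
  else st

def pvParseA (u : String) : Int :=
  (u.toList.foldl pvStepA (0, [])).1

def detect_crash (pre_uptime : String) (post_health : List (String × String)) : Bool :=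
  match pvDictGet post_health "alive" with
  | none => true                  -- falsy: missing key
  | some a =>
    if a = "" then true           -- falsy: empty string
    else
      let post_uptime := (pvDictGet post_health "uptime").getD ""
      if pre_uptime = "" || post_uptime = "" then false
      else decide (pvParseA post_uptime < pvParseA pre_uptime - 10)

-- ===== PORT B =====
def pvUnitSecs (c : Char) : Option Int :=
  if c = 'w' then some 604800
  else if c = 'd' then some 86400
  else if c = 'h' then some 3600
  else if c = 'm' then some 60
  else if c = 's' then some 1
  else none

-- one step of B's reversed loop; state = (total, mult, place); int(c) ported as codepoint-48 (exact for digits)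
def pvStepB (st : Int × Int × Int) (c : Char) : Int × Int × Int :=
  match pvUnitSecs c with
  | some m => (st.1, m, 1)
  | none =>
    if PySem.Chars.isdigit c then
      (st.1 + ((c.toNat : Int) - 48) * st.2.2 * st.2.1, st.2.1, 10 * st.2.2)
    else st

def pvParseB (u : String) : Int :=
  (u.toList.reverse.foldl pvStepB (0, 0, 1)).1

def detect_crash_alt (pre_uptime : String) (post_health : List (String × String)) : Bool :=
  match pvDictGet post_health "alive" with
  | none => true
  | some a =>
    if a = "" then true
    else
      let post_uptime := (pvDictGet post_health "uptime").getD ""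
      if pre_uptime = "" || post_uptime = "" then false
      else decide (pvParseB post_uptime < pvParseB pre_uptime - 10)

-- ===== PRECONDITION & SPEC =====
def Spec_detect_crash (pre_uptime : String) (post_health : List (String × String)) (out : Bool) : Prop := out = detect_crash_alt pre_uptime post_health
instance (pre_uptime : String) (post_health : List (String × String)) (out : Bool) : Decidable (Spec_detect_crash pre_uptime post_health out) := by unfold Spec_detect_crash; infer_instance

-- ===== CLAIM (what is proved, stated in full; the proofs are below) =====
def Claim_equal_detect_crash : Prop := ∀ (pre_uptime : String) (post_health : List (String × String)), Dom_detect_crash pre_uptime post_health → Spec_detect_crash pre_uptime post_health (detect_crash pre_uptime post_health)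

-- ===== LEMMAS AND PROOFS =====

theorem pvIntDigits_append (cs : List Char) (c : Char) :
    pvIntDigits (cs ++ [c]) = 10 * pvIntDigits cs + ((c.toNat : Int) - 48) := by
  simp [pvIntDigits]

-- the loop invariant: A's left fold from state (t, cur) over cs equals
-- t plus B's right-fold total over cs plus cur's value at the place/mult B reaches
theorem pv_main (cs : List Char) : ∀ (t : Int) (cur : List Char),
    (cs.foldl pvStepA (t, cur)).1
      = t + (cs.foldr (fun c st => pvStepB st c) (0, 0, 1)).1
          + pvIntDigits cur
            * (cs.foldr (fun c st => pvStepB st c) (0, 0, 1)).2.2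
            * (cs.foldr (fun c st => pvStepB st c) (0, 0, 1)).2.1 := by
  induction cs with
  | nil => intro t cur; simp
  | cons c cs ih =>
    intro t cur
    simp only [List.foldl_cons, List.foldr_cons]
    rw [ih]
    by_cases hd : PySem.Chars.isdigit c
    · have hu : pvUnitSecs c = none := by
        unfold pvUnitSecs
        split_ifs <;> try rfl
        all_goals (subst_vars; exact absurd hd (by decide))
      simp [pvStepA, pvStepB, hd, hu, pvIntDigits_append]; ring
    · rcases hm : pvUnitSecs c with _ | m
      · have hc : c ≠ 'w' ∧ c ≠ 'd' ∧ c ≠ 'h' ∧ c ≠ 'm' ∧ c ≠ 's' := by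
          revert hm; unfold pvUnitSecs; split_ifs <;> simp_all
        have hA : pvStepA (t, cur) c = (t, cur) := by
          simp [pvStepA, hd, hc.1, hc.2.1, hc.2.2.1, hc.2.2.2.1, hc.2.2.2.2]
        rw [hA]; simp [pvStepB, hm, hd]
      · have hA : pvStepA (t, cur) c = (t + pvIntDigits cur * m, []) := by
          have h := hm
          unfold pvUnitSecs at h
          unfold pvStepA
          rw [if_neg hd]
          split_ifs at h ⊢ <;> simp_all
          all_goals (cases h; ring)
        rw [hA]; simp [pvStepB, hm, pvIntDigits]; ring

theorem pvParse_eq (u : String) : pvParseA u = pvParseB u := by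
  unfold pvParseA pvParseB
  rw [List.foldl_reverse]
  have := pv_main u.toList 0 []
  simp [pvIntDigits] at this
  simpa using this

-- ===== VERDICT (by name: the statement is the Claim_ definition above) =====
theorem detect_crash_spec : Claim_equal_detect_crash := by
  intro pre_uptime post_health _
  unfold Spec_detect_crash detect_crash detect_crash_alt
  rcases pvDictGet post_health "alive" with _ | a <;> simp [pvParse_eq]
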